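-- pv_equiv track=rewrite | github.com/7dpk/Phylogenetic-tree | prettyprint.py | _adjust_right
-- ===== SOURCE A (Python) =====
-- def _adjust_right(L, i, n):
--     if i == n:
--         return []
--     else:
--         if i >= n//2:
--             adj = ' '
--         else:
--             adj = '|'
--
--         return [adj + L[i]] + _adjust_right(L, i+1, n)
-- ===== SOURCE B (Python) =====
-- def _adjust_right(L, i, n):
--     # stage 1: gather the elements by direct indexing, walking j from i to n
--     items = []
--     j = i
--     while j != n:
--         items.append(L[j])
--         j += 1
--     # stage 2: decorate each gathered element with its prefix
--     m = n // 2
--     return [(' ' if j >= m else '|') + x for j, x in zip(range(i, n), items)]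
-- ===== Notes on version B (the rewrite author's own statement) =====
-- stated objective: alternative
-- what changed: Replaced the single index recursion that prefixes each element as it descends with two staged passes: a gathering loop that collects the raw elements, then a decorating pass that zips them with their indices and attaches ' ' or '|'.
import Mathlib
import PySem

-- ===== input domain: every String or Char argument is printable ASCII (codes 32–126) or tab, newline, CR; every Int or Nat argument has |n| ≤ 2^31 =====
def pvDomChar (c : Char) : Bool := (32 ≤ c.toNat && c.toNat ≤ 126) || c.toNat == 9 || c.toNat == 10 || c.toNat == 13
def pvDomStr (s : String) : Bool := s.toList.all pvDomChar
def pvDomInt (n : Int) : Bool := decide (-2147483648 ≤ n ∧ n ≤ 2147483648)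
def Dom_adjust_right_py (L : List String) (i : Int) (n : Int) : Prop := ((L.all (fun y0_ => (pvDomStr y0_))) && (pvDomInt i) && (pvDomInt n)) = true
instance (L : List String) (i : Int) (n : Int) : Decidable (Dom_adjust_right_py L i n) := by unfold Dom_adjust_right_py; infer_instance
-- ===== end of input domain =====

-- B replaces A's prefix-as-you-descend recursion with two staged passes: gather the raw elements
-- by direct indexing, then decorate them by zipping with their indices (alternative decomposition).

-- ===== PORT A =====
-- Fuel (n - i).toNat only makes the recursion i := i+1 up to n structural; under Pre_ it never runs out.
def adjustRightRecA (L : List String) (n : Int) : Nat → Int → List String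
  | 0, _ => []
  | fuel + 1, i =>
    if i = n then []
    else
      let adj : String := if i ≥ PySem.Int.floordiv n 2 then " " else "|"
      match PySem.List.pyGet? L i with
      | none => []   -- L[i] raises IndexError in Python; excluded by Pre_
      | some x => (adj ++ x) :: adjustRightRecA L n fuel (i + 1)

def adjust_right_py (L : List String) (i : Int) (n : Int) : List String :=
  adjustRightRecA L n (n - i).toNat i

-- ===== PORT B =====
-- Stage 1: the gathering while-loop (fuel (n - j).toNat makes j := j+1 structural; under Pre_ it never runs out).
def gatherRight (L : List String) (n : Int) : Nat → Int → List String → List String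
  | 0, _, items => items
  | fuel + 1, j, items =>
    if j = n then items
    else
      match PySem.List.pyGet? L j with
      | none => items   -- L[j] raises IndexError in Python; excluded by Pre_
      | some x => gatherRight L n fuel (j + 1) (items ++ [x])

-- Stage 2: zip the gathered elements with range(i, n) and attach each prefix.
def adjust_right_py_alt (L : List String) (i : Int) (n : Int) : List String :=
  let items := gatherRight L n (n - i).toNat i []
  let m := PySem.Int.floordiv n 2
  ((PySem.List.pyRange i n 1).zip items).map
    (fun p => (if p.1 ≥ m then " " else "|") ++ p.2)

-- ===== PRECONDITION & SPEC =====
-- Pre_ = exactly the inputs on which A returns: i = n, or i < n with every index i..n-1 a valid Python index of L.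
def Pre_adjust_right_py (L : List String) (i : Int) (n : Int) : Prop :=
  i = n ∨ (i < n ∧ -(L.length : Int) ≤ i ∧ n ≤ (L.length : Int))
instance (L : List String) (i : Int) (n : Int) : Decidable (Pre_adjust_right_py L i n) := by
  unfold Pre_adjust_right_py; infer_instance

def pvWitness_adjust_right_py : List String × Int × Int := (["a", "b", "c"], 0, 3)

def Spec_adjust_right_py (L : List String) (i : Int) (n : Int) (out : List String) : Prop := out = adjust_right_py_alt L i n
instance (L : List String) (i : Int) (n : Int) (out : List String) : Decidable (Spec_adjust_right_py L i n out) := by unfold Spec_adjust_right_py; infer_instance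

-- ===== CLAIM (what is proved, stated in full; the proofs are below) =====
def Claim_equal_adjust_right_py : Prop := ∀ (L : List String) (i : Int) (n : Int), Dom_adjust_right_py L i n → Pre_adjust_right_py L i n → Spec_adjust_right_py L i n (adjust_right_py L i n)

-- ===== LEMMAS AND PROOFS =====

-- A's recursion is the elementwise map over range(i, n).
theorem recA_eq_map (L : List String) (n : Int) :
    ∀ (fuel : Nat) (i : Int), fuel = (n - i).toNat →
      (i = n ∨ (i < n ∧ -(L.length : Int) ≤ i ∧ n ≤ (L.length : Int))) →
      adjustRightRecA L n fuel i =
        (PySem.List.pyRange i n 1).map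
          (fun j => (if j ≥ PySem.Int.floordiv n 2 then " " else "|") ++ PySem.List.pyGetD L j "") := by
  intro fuel
  induction fuel with
  | zero =>
    intro i hf hpre
    rcases hpre with h | h
    · simp [adjustRightRecA, h, PySem.List.pyRange_one_eq_nil le_rfl]
    · omega
  | succ k ih =>
    intro i hf hpre
    rcases hpre with h | h
    · simp [adjustRightRecA, h, PySem.List.pyRange_one_eq_nil le_rfl]
    · obtain ⟨hin, hlo, hhi⟩ := h
      cases hg : PySem.List.pyGet? L i with
      | none =>
        exfalso
        rw [PySem.List.pyGet?_eq_none_iff] at hg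
        exact hg (by unfold PySem.Raise.InRange; omega)
      | some x =>
        have hx : PySem.List.pyGetD L i "" = x := by
          simp [PySem.List.pyGetD, hg]
        simp only [adjustRightRecA, if_neg (show ¬ i = n by omega), hg]
        rw [PySem.List.pyRange_one_cons hin, List.map_cons, hx]
        congr 1
        exact ih (i + 1) (by omega) (by omega)

-- B's gathering loop collects exactly the elements of range(i, n), after the accumulator.
theorem gather_eq_append_map (L : List String) (n : Int) :
    ∀ (fuel : Nat) (j : Int) (acc : List String), fuel = (n - j).toNat →
      (j = n ∨ (j < n ∧ -(L.length : Int) ≤ j ∧ n ≤ (L.length : Int))) →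
      gatherRight L n fuel j acc =
        acc ++ (PySem.List.pyRange j n 1).map (fun k => PySem.List.pyGetD L k "") := by
  intro fuel
  induction fuel with
  | zero =>
    intro j acc hf hpre
    rcases hpre with h | h
    · simp [gatherRight, h, PySem.List.pyRange_one_eq_nil le_rfl]
    · omega
  | succ k ih =>
    intro j acc hf hpre
    rcases hpre with h | h
    · simp [gatherRight, h, PySem.List.pyRange_one_eq_nil le_rfl]
    · obtain ⟨hjn, hlo, hhi⟩ := h
      cases hg : PySem.List.pyGet? L j with
      | none =>
        exfalso
        rw [PySem.List.pyGet?_eq_none_iff] at hg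
        exact hg (by unfold PySem.Raise.InRange; omega)
      | some x =>
        have hx : PySem.List.pyGetD L j "" = x := by
          simp [PySem.List.pyGetD, hg]
        simp only [gatherRight, if_neg (show ¬ j = n by omega), hg]
        rw [ih (j + 1) _ (by omega) (by omega)]
        rw [PySem.List.pyRange_one_cons hjn, List.map_cons, hx]
        simp

-- Zipping a list with its own image under f is mapping the pairing function.
theorem zip_map_self {α β : Type} (l : List α) (f : α → β) :
    l.zip (l.map f) = l.map (fun a => (a, f a)) := by
  induction l with
  | nil => rfl
  | cons a t ih => simp [List.zip_cons_cons, ih]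

-- ===== VERDICT (by name: the statement is the Claim_ definition above) =====
theorem adjust_right_py_spec : Claim_equal_adjust_right_py := by
  intro L i n _ hpre
  unfold Spec_adjust_right_py adjust_right_py adjust_right_py_alt
  rw [recA_eq_map L n _ i rfl hpre, gather_eq_append_map L n _ i [] rfl hpre]
  dsimp only
  rw [List.nil_append, zip_map_self, List.map_map]
  rfl
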